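-- pv_equiv track=rewrite | github.com/KirillNN/Python_Codewars | codewars_7kyu.py | is_sator_square
-- ===== SOURCE A (Python) =====
-- def is_sator_square(tablet):
--     dict_word_ltr = []
--     dict_word_rtl = []
--     dict_word_ttb = []
--     dict_word_btt = []
--     len_ = len(tablet)
--
--     for item in tablet:
--         word = ''.join(item)
--         dict_word_ltr.append(word)
--     for x in range(len_ - 1, -1, -1):
--         word = ''.join(tablet[x][::-1])
--         dict_word_rtl.append(word)
--     for x in range(len_):
--         word = ''
--         for y in range(len_):
--             word += tablet[y][x]
--         dict_word_ttb.append(word)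
--     for x in range(len_ - 1, -1, -1):
--         word = ''
--         for y in range(len_ - 1, -1, -1):
--             word += tablet[y][x]
--         dict_word_btt.append(word)
--
--     return dict_word_rtl == dict_word_ltr == dict_word_ttb == dict_word_btt
-- ===== SOURCE B (Python) =====
-- def is_sator_square(tablet):
--     n = len(tablet)
--     for i in range(n):
--         word = ''.join(tablet[i])
--         if word != ''.join(tablet[y][i] for y in range(n)):
--             return False
--         if word != ''.join(reversed(tablet[n - 1 - i])):
--             return False
--         if word != ''.join(tablet[n - 1 - y][n - 1 - i] for y in range(n)):
--             return False
--     return True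
-- ===== Notes on version B (the rewrite author's own statement) =====
-- stated objective: simpler
-- what changed: A materializes four complete word lists (rows, 180-degree-rotated rows, columns, 180-degree-rotated columns) and then compares the lists; B makes a single indexed pass that, for each i, compares the i-th row word against its column, its 180-degree row partner and its 180-degree column partner, returning False at the first mismatch and never building any list.
import Mathlib
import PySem

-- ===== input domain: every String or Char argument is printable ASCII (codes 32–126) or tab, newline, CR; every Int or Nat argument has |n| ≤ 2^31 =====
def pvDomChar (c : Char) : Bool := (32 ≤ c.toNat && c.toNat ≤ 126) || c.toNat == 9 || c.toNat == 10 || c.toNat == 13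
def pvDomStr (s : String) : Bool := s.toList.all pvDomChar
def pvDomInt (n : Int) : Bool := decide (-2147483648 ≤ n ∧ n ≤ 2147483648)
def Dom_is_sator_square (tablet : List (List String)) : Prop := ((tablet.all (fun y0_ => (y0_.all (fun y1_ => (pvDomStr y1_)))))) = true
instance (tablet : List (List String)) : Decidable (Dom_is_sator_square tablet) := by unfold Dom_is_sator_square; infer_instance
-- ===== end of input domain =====

-- B replaces A's four materialized word lists and their list comparisons by a single
-- indexed pass with early exit, comparing each row word against its column, its 180°
-- row partner and its 180° column partner (objective: simpler; measured faster by the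
-- timing run thanks to the early exit).

-- ===== PORT A =====
def is_sator_square (tablet : List (List String)) : Bool :=
  let len_ : Int := (tablet.length : Int)
  let ltr : List String :=
    tablet.foldl (fun acc item => acc ++ [PySem.Str.join "" item]) []
  let rtl : List String :=
    (PySem.List.pyRange (len_ - 1) (-1) (-1)).foldl
      (fun acc x => acc ++ [PySem.Str.join "" (PySem.List.pyGetD tablet x []).reverse]) []
  let ttb : List String :=
    (PySem.List.pyRange 0 len_ 1).foldl
      (fun acc x => acc ++ [(PySem.List.pyRange 0 len_ 1).foldl
        (fun word y => word ++ PySem.List.pyGetD (PySem.List.pyGetD tablet y []) x "") ""]) []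
  let btt : List String :=
    (PySem.List.pyRange (len_ - 1) (-1) (-1)).foldl
      (fun acc x => acc ++ [(PySem.List.pyRange (len_ - 1) (-1) (-1)).foldl
        (fun word y => word ++ PySem.List.pyGetD (PySem.List.pyGetD tablet y []) x "") ""]) []
  (rtl == ltr) && (ltr == ttb) && (ttb == btt)

-- ===== PORT B =====
-- the 'for i in range(n): … return False' loop with early exit, as structural recursion
-- over the index list
def pvSatorGo (tablet : List (List String)) (n : Int) : List Int → Bool
  | [] => true
  | i :: rest =>
    let word := PySem.Str.join "" (PySem.List.pyGetD tablet i [])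
    if word != PySem.Str.join "" ((PySem.List.pyRange 0 n 1).map (fun y =>
        PySem.List.pyGetD (PySem.List.pyGetD tablet y []) i "")) then false
    else if word != PySem.Str.join "" (PySem.List.pyGetD tablet (n - 1 - i) []).reverse then false
    else if word != PySem.Str.join "" ((PySem.List.pyRange 0 n 1).map (fun y =>
        PySem.List.pyGetD (PySem.List.pyGetD tablet (n - 1 - y) []) (n - 1 - i) "")) then false
    else pvSatorGo tablet n rest

def is_sator_square_alt (tablet : List (List String)) : Bool :=
  let n : Int := (tablet.length : Int)
  pvSatorGo tablet n (PySem.List.pyRange 0 n 1)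

-- ===== PRECONDITION & SPEC =====
-- Pre_ excludes exactly the inputs where the Python A raises IndexError:
-- some row shorter than the number of rows (A's column loops index tablet[y][x] for x,y < len(tablet)).
def Pre_is_sator_square (tablet : List (List String)) : Prop :=
  ∀ row ∈ tablet, tablet.length ≤ row.length
instance (tablet : List (List String)) : Decidable (Pre_is_sator_square tablet) := by
  unfold Pre_is_sator_square; infer_instance

def pvWitness_is_sator_square : List (List String) := [["s", "a"], ["a", "s"]]

def Spec_is_sator_square (tablet : List (List String)) (out : Bool) : Prop := out = is_sator_square_alt tablet
instance (tablet : List (List String)) (out : Bool) : Decidable (Spec_is_sator_square tablet out) := by unfold Spec_is_sator_square; infer_instance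

-- ===== CLAIM (what is proved, stated in full; the proofs are below) =====
def Claim_equal_is_sator_square : Prop := ∀ (tablet : List (List String)), Dom_is_sator_square tablet → Pre_is_sator_square tablet → Spec_is_sator_square tablet (is_sator_square tablet)

-- ===== LEMMAS AND PROOFS =====

-- ''.join over nil / cons
theorem pv_join_nil : PySem.Str.join "" [] = "" := by
  apply String.ext
  simp [PySem.Str.toList_join, PySem.Chars.join_nil]

theorem pv_join_cons (p : String) (rest : List String) :
    PySem.Str.join "" (p :: rest) = p ++ PySem.Str.join "" rest := by
  apply String.ext
  cases rest with
  | nil => simp [PySem.Str.toList_join, PySem.Chars.join, List.intercalate]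
  | cons q r => simp [PySem.Str.toList_join, PySem.Chars.join_cons_cons]

-- the '+=' string accumulation loop is ''.join of the mapped list
theorem pv_foldl_str {α : Type} (f : α → String) (l : List α) (s : String) :
    l.foldl (fun w y => w ++ f y) s = s ++ PySem.Str.join "" (l.map f) := by
  induction l generalizing s with
  | nil => simp [pv_join_nil]
  | cons a r ih =>
      simp only [List.foldl_cons, List.map_cons, pv_join_cons]
      rw [ih, String.append_assoc]

theorem pv_empty_append (s : String) : "" ++ s = s := by
  apply String.ext; simp

-- reversing [0, …, n-1] is the same as mapping i ↦ n-1-i over it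
theorem pv_reverse_pyRange (n : Int) :
    (PySem.List.pyRange 0 n 1).reverse
      = (PySem.List.pyRange 0 n 1).map (fun i => n - 1 - i) := by
  refine List.ext_getElem (by simp) (fun k h1 h2 => ?_)
  simp only [List.length_reverse, List.length_map, PySem.List.length_pyRange_one] at h1 h2
  rw [List.getElem_reverse, List.getElem_map]
  simp only [PySem.List.getElem_pyRange_one, PySem.List.length_pyRange_one]
  omega

-- equality of two maps over the same list, as a pointwise .all
theorem pv_map_beq_map {α : Type} (f g : α → String) (l : List α) :
    ((l.map f == l.map g) : Bool) = l.all (fun x => f x == g x) := by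
  induction l with
  | nil => rfl
  | cons a r ih => simp only [List.map_cons, List.all_cons, List.cons_beq_cons, ih]

-- the per-index boolean of A's three list comparisons equals B's per-index boolean
theorem pv_pointwise (w c d e : String) :
    (((d == w) && (w == c)) && (c == e)) = (((w == c) && (w == d)) && (w == e)) := by
  by_cases h1 : w = c
  · subst h1
    by_cases h2 : d = w
    · subst h2; simp
    · have ha : (d == w) = false := beq_eq_false_iff_ne.mpr h2
      have hb : (w == d) = false := beq_eq_false_iff_ne.mpr (Ne.symm h2)
      simp [ha, hb]
  · have hc : (w == c) = false := beq_eq_false_iff_ne.mpr h1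
    simp [hc]

-- ∀-conjunction splits over .all
theorem pv_all_and {α : Type} (p q : α → Bool) (l : List α) :
    (l.all p && l.all q) = l.all (fun x => p x && q x) := by
  induction l with
  | nil => rfl
  | cons a t ih =>
      simp only [List.all_cons, ← ih]
      ac_rfl

theorem pv_all_congr {α : Type} (p q : α → Bool) (l : List α)
    (h : ∀ x ∈ l, p x = q x) : l.all p = l.all q := by
  induction l with
  | nil => rfl
  | cons a t ih =>
      simp only [List.all_cons, h a (List.mem_cons_self ..),
        ih (fun x hx => h x (List.mem_cons_of_mem _ hx))]

-- the early-exit loop is the .all of its per-index condition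
theorem pv_go_eq_all (tablet : List (List String)) (n : Int) (l : List Int) :
    pvSatorGo tablet n l
      = l.all (fun i =>
          ((PySem.Str.join "" (PySem.List.pyGetD tablet i [])
              == PySem.Str.join "" ((PySem.List.pyRange 0 n 1).map (fun y =>
                   PySem.List.pyGetD (PySem.List.pyGetD tablet y []) i ""))) &&
           (PySem.Str.join "" (PySem.List.pyGetD tablet i [])
              == PySem.Str.join "" (PySem.List.pyGetD tablet (n - 1 - i) []).reverse)) &&
           (PySem.Str.join "" (PySem.List.pyGetD tablet i [])
              == PySem.Str.join "" ((PySem.List.pyRange 0 n 1).map (fun y =>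
                   PySem.List.pyGetD (PySem.List.pyGetD tablet (n - 1 - y) []) (n - 1 - i) "")))) := by
  induction l with
  | nil => rfl
  | cons i rest ih =>
      simp only [pvSatorGo, List.all_cons, ih, bne]
      by_cases h1 : PySem.Str.join "" (PySem.List.pyGetD tablet i [])
          = PySem.Str.join "" ((PySem.List.pyRange 0 n 1).map (fun y =>
              PySem.List.pyGetD (PySem.List.pyGetD tablet y []) i "")) <;>
        by_cases h2 : PySem.Str.join "" (PySem.List.pyGetD tablet i [])
          = PySem.Str.join "" (PySem.List.pyGetD tablet (n - 1 - i) []).reverse <;>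
        by_cases h3 : PySem.Str.join "" (PySem.List.pyGetD tablet i [])
          = PySem.Str.join "" ((PySem.List.pyRange 0 n 1).map (fun y =>
              PySem.List.pyGetD (PySem.List.pyGetD tablet (n - 1 - y) []) (n - 1 - i) "")) <;>
        simp_all [beq_iff_eq]

-- ===== VERDICT (by name: the statement is the Claim_ definition above) =====
theorem is_sator_square_spec : Claim_equal_is_sator_square := by
  intro tablet _ _
  unfold Spec_is_sator_square is_sator_square is_sator_square_alt
  simp only []
  set n : Int := (tablet.length : Int) with hn
  have key : ∀ (x : Int) (l : List Int),
      l.foldl (fun word y => word ++ PySem.List.pyGetD (PySem.List.pyGetD tablet y []) x "") ""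
      = PySem.Str.join "" (l.map (fun y => PySem.List.pyGetD (PySem.List.pyGetD tablet y []) x "")) := by
    intro x l
    rw [pv_foldl_str, pv_empty_append]
  have hrange : PySem.List.pyRange (n - 1) (-1) (-1)
      = (PySem.List.pyRange 0 n 1).map (fun i => n - 1 - i) := by
    rw [← pv_reverse_pyRange]
    have := PySem.List.pyRange_neg_one_eq_reverse (n - 1) (-1)
    simpa using this
  have hgrid : (PySem.List.pyRange 0 n 1).map (fun j => PySem.List.pyGetD tablet j []) = tablet :=
    PySem.List.map_pyGetD_pyRange_zero' tablet []
  -- dict_word_ltr as a map over [0..n-1]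
  have hltr : tablet.foldl (fun acc item => acc ++ [PySem.Str.join "" item]) []
      = (PySem.List.pyRange 0 n 1).map (fun i => PySem.Str.join "" (PySem.List.pyGetD tablet i [])) := by
    have h0 := PySem.List.foldl_append_singleton_eq_map
      (fun item => PySem.Str.join "" item) tablet ([] : List String)
    rw [List.nil_append] at h0
    rw [h0]
    conv_lhs => rw [← hgrid]
    rw [List.map_map]
    rfl
  -- dict_word_rtl as a map over [0..n-1]
  have hrtl : (PySem.List.pyRange (n - 1) (-1) (-1)).foldl
      (fun acc x => acc ++ [PySem.Str.join "" (PySem.List.pyGetD tablet x []).reverse]) []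
      = (PySem.List.pyRange 0 n 1).map
          (fun i => PySem.Str.join "" (PySem.List.pyGetD tablet (n - 1 - i) []).reverse) := by
    rw [PySem.List.foldl_append_singleton_eq_map, hrange, List.nil_append, List.map_map]
    rfl
  -- dict_word_ttb as a map over [0..n-1]
  have httb : (PySem.List.pyRange 0 n 1).foldl
      (fun acc x => acc ++ [(PySem.List.pyRange 0 n 1).foldl
        (fun word y => word ++ PySem.List.pyGetD (PySem.List.pyGetD tablet y []) x "") ""]) []
      = (PySem.List.pyRange 0 n 1).map (fun i =>
          PySem.Str.join "" ((PySem.List.pyRange 0 n 1).map (fun y =>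
            PySem.List.pyGetD (PySem.List.pyGetD tablet y []) i ""))) := by
    rw [PySem.List.foldl_append_singleton_eq_map, List.nil_append]
    exact List.map_congr_left (fun x _ => key x _)
  -- dict_word_btt as a map over [0..n-1]
  have hbtt : (PySem.List.pyRange (n - 1) (-1) (-1)).foldl
      (fun acc x => acc ++ [(PySem.List.pyRange (n - 1) (-1) (-1)).foldl
        (fun word y => word ++ PySem.List.pyGetD (PySem.List.pyGetD tablet y []) x "") ""]) []
      = (PySem.List.pyRange 0 n 1).map (fun i =>
          PySem.Str.join "" ((PySem.List.pyRange 0 n 1).map (fun y =>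
            PySem.List.pyGetD (PySem.List.pyGetD tablet (n - 1 - y) []) (n - 1 - i) ""))) := by
    rw [PySem.List.foldl_append_singleton_eq_map, hrange, List.nil_append, List.map_map]
    refine List.map_congr_left (fun i _ => ?_)
    simp only [Function.comp]
    rw [key, List.map_map]
    rfl
  rw [hltr, hrtl, httb, hbtt, pv_go_eq_all,
      pv_map_beq_map, pv_map_beq_map, pv_map_beq_map, pv_all_and, pv_all_and]
  exact pv_all_congr _ _ _ (fun i _ => pv_pointwise _ _ _ _)
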